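-- pv_equiv track=rewrite | github.com/anthon793/e-library | app/utils/link_extractor.py | pick_pdf_like_links
-- ===== SOURCE A (Python) =====
-- def pick_pdf_like_links(links: list[str]) -> list[str]:
--     scored = []
--     for link in links:
--         lowered = link.lower()
--         score = 0
--         if lowered.endswith(".pdf"):
--             score += 3
--         if "pdf" in lowered:
--             score += 2
--         if any(k in lowered for k in ("download", "files", "content", "book")):
--             score += 1
--         scored.append((score, link))
--
--     scored.sort(key=lambda x: x[0], reverse=True)
--     return [item[1] for item in scored if item[0] > 0]
-- ===== SOURCE B (Python) =====
-- def _score(link):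
--     lowered = link.lower()
--     score = 0
--     if lowered.endswith(".pdf"):
--         score += 3
--     if "pdf" in lowered:
--         score += 2
--     if any(k in lowered for k in ("download", "files", "content", "book")):
--         score += 1
--     return score
--
--
-- def pick_pdf_like_links(links: list[str]) -> list[str]:
--     buckets = [[] for _ in range(7)]
--     for link in links:
--         buckets[_score(link)].append(link)
--     out = []
--     for s in range(6, 0, -1):
--         out.extend(buckets[s])
--     return out
-- ===== Notes on version B (the rewrite author's own statement) =====
-- stated objective: alternative
-- what changed: Replaces building a (score, link) pair list and stable-sorting it descending by score with a single pass that appends each link to a score bucket (list of 7 lists) and then emits buckets from score 6 down to 1, dropping score 0.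
import Mathlib
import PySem

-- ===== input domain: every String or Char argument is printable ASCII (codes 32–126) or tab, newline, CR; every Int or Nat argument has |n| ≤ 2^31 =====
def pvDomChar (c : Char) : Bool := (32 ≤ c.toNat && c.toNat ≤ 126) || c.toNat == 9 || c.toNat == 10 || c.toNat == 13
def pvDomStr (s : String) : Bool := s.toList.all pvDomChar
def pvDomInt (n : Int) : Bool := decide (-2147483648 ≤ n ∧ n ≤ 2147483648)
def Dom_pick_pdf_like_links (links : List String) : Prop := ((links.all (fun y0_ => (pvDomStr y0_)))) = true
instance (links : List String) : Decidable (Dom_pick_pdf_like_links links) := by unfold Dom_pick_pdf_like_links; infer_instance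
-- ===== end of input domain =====

-- B replaces the stable comparison sort over (score, link) pairs by score buckets filled in
-- one pass and emitted from score 6 down to 1 (objective: alternative decomposition, same result).

-- ===== PORT A =====
def pick_pdf_like_links (links : List String) : List String :=
  let scored : List (Int × String) := links.foldl (fun scored link =>
    let lowered := PySem.Str.lower link
    let score : Int := 0
    let score := if PySem.Str.endswith lowered ".pdf" then score + 3 else score
    let score := if PySem.Str.isIn "pdf" lowered then score + 2 else score
    let score := if [("download" : String), "files", "content", "book"].any
        (fun k => PySem.Str.isIn k lowered) then score + 1 else score
    scored ++ [(score, link)]) []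
  let sortedScored := PySem.List.sorted scored (fun x => x.1) true
  (sortedScored.filter (fun item => decide (0 < item.1))).map (fun item => item.2)

-- ===== PORT B =====
-- Source B's helper _score
def pvScore (link : String) : Int :=
  let lowered := PySem.Str.lower link
  let score : Int := 0
  let score := if PySem.Str.endswith lowered ".pdf" then score + 3 else score
  let score := if PySem.Str.isIn "pdf" lowered then score + 2 else score
  let score := if [("download" : String), "files", "content", "book"].any
      (fun k => PySem.Str.isIn k lowered) then score + 1 else score
  score

-- buckets[i].append(x)  (i is a score, 0..6, so .toNat at the call site is exact)
def pvBucketAppend : List (List String) → Nat → String → List (List String)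
  | [], _, _ => []
  | b :: bs, 0, x => (b ++ [x]) :: bs
  | b :: bs, n + 1, x => b :: pvBucketAppend bs n x

-- buckets[s] for s in 0..6
def pvBucketGet : List (List String) → Nat → List String
  | [], _ => []
  | b :: _, 0 => b
  | _ :: bs, n + 1 => pvBucketGet bs n

def pick_pdf_like_links_alt (links : List String) : List String :=
  let buckets := links.foldl
    (fun bs link => pvBucketAppend bs (pvScore link).toNat link)
    [[], [], [], [], [], [], []]
  (PySem.List.pyRange 6 0 (-1)).foldl (fun out s => out ++ pvBucketGet buckets s.toNat) []

-- ===== PRECONDITION & SPEC =====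
def Spec_pick_pdf_like_links (links : List String) (out : List String) : Prop := out = pick_pdf_like_links_alt links
instance (links : List String) (out : List String) : Decidable (Spec_pick_pdf_like_links links out) := by unfold Spec_pick_pdf_like_links; infer_instance

-- ===== CLAIM (what is proved, stated in full; the proofs are below) =====
def Claim_equal_pick_pdf_like_links : Prop := ∀ (links : List String), Dom_pick_pdf_like_links links → Spec_pick_pdf_like_links links (pick_pdf_like_links links)

-- ===== LEMMAS AND PROOFS =====

-- score bucket of the scored-pair list
def pvFilt (ps : List (Int × String)) (v : Int) : List (Int × String) :=
  ps.filter (fun p => p.1 == v)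

lemma pvScore_mem (l : String) : pvScore l ∈ ([6, 5, 4, 3, 2, 1, 0] : List Int) := by
  simp only [pvScore]
  split_ifs <;> decide

lemma insertBy_cons (bef : (Int × String) → (Int × String) → Bool) (x y : Int × String)
    (ys : List (Int × String)) :
    PySem.List.insertBy bef x (y :: ys) =
      if bef x y then x :: y :: ys else y :: PySem.List.insertBy bef x ys := rfl

lemma insertBy_skip (bef : (Int × String) → (Int × String) → Bool) (x : Int × String)
    (H L : List (Int × String)) (hH : ∀ h ∈ H, bef x h = false) :
    PySem.List.insertBy bef x (H ++ L) = H ++ PySem.List.insertBy bef x L := by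
  induction H with
  | nil => simp
  | cons h H ih =>
      rw [List.cons_append, insertBy_cons, hH h (by simp)]
      simp only [Bool.false_eq_true, if_false, List.cons_append]
      rw [ih (fun a ha => hH a (by simp [ha]))]

lemma insertBy_head (bef : (Int × String) → (Int × String) → Bool) (x : Int × String)
    (T : List (Int × String)) (hT : ∀ t ∈ T, bef x t = true) :
    PySem.List.insertBy bef x T = x :: T := by
  cases T with
  | nil => rfl
  | cons t T => rw [insertBy_cons, hT t (by simp), if_pos rfl]

lemma flatMap_congr_mem {α β : Type} (l : List α) (f g : α → List β)
    (h : ∀ a ∈ l, f a = g a) : l.flatMap f = l.flatMap g := by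
  induction l with
  | nil => rfl
  | cons a l ih =>
      simp only [List.flatMap_cons, h a (by simp), ih (fun b hb => h b (by simp [hb]))]

lemma mem_pvFilt {ps : List (Int × String)} {v : Int} {p : Int × String}
    (h : p ∈ pvFilt ps v) : p.1 = v := by
  have := List.of_mem_filter h
  simpa using this

lemma pvFilt_append_single (ps : List (Int × String)) (x : Int × String) (v : Int) :
    pvFilt (ps ++ [x]) v = pvFilt ps v ++ (if x.1 = v then [x] else []) := by
  simp [pvFilt, List.filter_append]
  split_ifs <;> simp_all

lemma insert_flatMap (ps : List (Int × String)) (x : Int × String) :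
    ∀ (vs : List Int), vs.Pairwise (fun a b => b < a) → x.1 ∈ vs →
      PySem.List.insertBy (fun a b => decide (b.1 < a.1)) x (vs.flatMap (pvFilt ps)) =
        vs.flatMap (pvFilt (ps ++ [x])) := by
  intro vs
  induction vs with
  | nil => intro _ hx; cases hx
  | cons v vs ih =>
      intro hpw hx
      have hvs : ∀ w ∈ vs, w < v := by
        intro w hw; exact (List.pairwise_cons.mp hpw).1 w hw
      rw [List.flatMap_cons, List.flatMap_cons]
      by_cases hxv : x.1 = v
      · rw [insertBy_skip _ _ _ _ (by
          intro h hh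
          have : h.1 = v := mem_pvFilt hh
          simp [this, hxv])]
        rw [insertBy_head _ _ _ (by
          intro t ht
          rcases List.mem_flatMap.mp ht with ⟨w, hw, htw⟩
          have : t.1 = w := mem_pvFilt htw
          simp [this, hxv]
          exact hvs w hw)]
        rw [pvFilt_append_single, if_pos hxv]
        rw [flatMap_congr_mem vs (pvFilt (ps ++ [x])) (pvFilt ps) (by
          intro w hw
          rw [pvFilt_append_single, if_neg (by
            have := hvs w hw; omega), List.append_nil])]
        simp
      · have hx' : x.1 ∈ vs := by
          rcases List.mem_cons.mp hx with h | h
          · exact absurd h hxv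
          · exact h
        have hlt : x.1 < v := hvs _ hx'
        rw [insertBy_skip _ _ _ _ (by
          intro h hh
          have : h.1 = v := mem_pvFilt hh
          simp [this]; omega)]
        rw [ih ((List.pairwise_cons.mp hpw).2) hx']
        rw [pvFilt_append_single, if_neg hxv, List.append_nil]

lemma sorted_buckets (ps : List (Int × String))
    (hps : ∀ p ∈ ps, p.1 ∈ ([6, 5, 4, 3, 2, 1, 0] : List Int)) :
    PySem.List.sorted ps (fun x => x.1) true =
      ([6, 5, 4, 3, 2, 1, 0] : List Int).flatMap (pvFilt ps) := by
  induction ps using List.reverseRecOn with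
  | nil => simp [pvFilt]; rfl
  | append_singleton ps x ih =>
      rw [PySem.List.sorted_rev_eq_foldl_insertBy, List.foldl_append, List.foldl_cons,
        List.foldl_nil, ← PySem.List.sorted_rev_eq_foldl_insertBy]
      rw [ih (fun p hp => hps p (by simp [hp]))]
      exact insert_flatMap ps x _ (by decide) (hps x (by simp))

lemma scored_map (links : List String) :
    links.foldl (fun scored link => scored ++ [(pvScore link, link)]) [] =
      links.map (fun l => (pvScore l, l)) := by
  rw [PySem.List.foldl_append_eq_flatMap]
  induction links <;> simp_all [List.flatMap]

lemma filt_map_snd (links : List String) (v : Int) :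
    (pvFilt (links.map (fun l => (pvScore l, l))) v).map (fun p => p.2) =
      links.filter (fun l => pvScore l == v) := by
  induction links with
  | nil => rfl
  | cons l links ih =>
      simp only [List.map_cons, pvFilt, List.filter_cons] at *
      by_cases h : pvScore l = v <;> simp [h, ih]

lemma filter_flatMap {α β : Type} (l : List α) (f : α → List β) (p : β → Bool) :
    (l.flatMap f).filter p = l.flatMap (fun a => (f a).filter p) := by
  induction l with
  | nil => rfl
  | cons a l ih => simp [List.flatMap_cons, List.filter_append, ih]

lemma A_closed (links : List String) :
    pick_pdf_like_links links =
      ([6, 5, 4, 3, 2, 1] : List Int).flatMap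
        (fun v => links.filter (fun l => pvScore l == v)) := by
  show ((PySem.List.sorted
      (links.foldl (fun scored link => scored ++ [(pvScore link, link)]) [])
      (fun x => x.1) true).filter (fun item => decide (0 < item.1))).map
        (fun item => item.2) =
    ([6, 5, 4, 3, 2, 1] : List Int).flatMap
      (fun v => links.filter (fun l => pvScore l == v))
  rw [scored_map]
  rw [sorted_buckets _ (by
    intro p hp
    rcases List.mem_map.mp hp with ⟨l, _, rfl⟩
    exact pvScore_mem l)]
  rw [filter_flatMap]
  have hkeep : ∀ v : Int, 0 < v →
      (pvFilt (links.map (fun l => (pvScore l, l))) v).filter (fun item => decide (0 < item.1)) =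
        pvFilt (links.map (fun l => (pvScore l, l))) v := by
    intro v hv
    apply List.filter_eq_self.mpr
    intro p hp
    have := mem_pvFilt hp
    simp [this]; omega
  have hdrop :
      (pvFilt (links.map (fun l => (pvScore l, l))) 0).filter (fun item => decide (0 < item.1)) = [] := by
    apply List.filter_eq_nil_iff.mpr
    intro p hp
    have := mem_pvFilt hp
    simp [this]
  simp only [List.flatMap_cons, List.flatMap_nil, List.append_nil,
    hkeep 6 (by norm_num), hkeep 5 (by norm_num), hkeep 4 (by norm_num),
    hkeep 3 (by norm_num), hkeep 2 (by norm_num), hkeep 1 (by norm_num), hdrop]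
  simp only [List.map_append, filt_map_snd]

lemma buckets_closed (links : List String) :
    links.foldl (fun bs link => pvBucketAppend bs (pvScore link).toNat link)
        [[], [], [], [], [], [], []] =
      [links.filter (fun l => pvScore l == 0), links.filter (fun l => pvScore l == 1),
       links.filter (fun l => pvScore l == 2), links.filter (fun l => pvScore l == 3),
       links.filter (fun l => pvScore l == 4), links.filter (fun l => pvScore l == 5),
       links.filter (fun l => pvScore l == 6)] := by
  induction links using List.reverseRecOn with
  | nil => rfl
  | append_singleton links l ih =>
      rw [List.foldl_append, List.foldl_cons, List.foldl_nil, ih]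
      have h := pvScore_mem l
      simp only [List.mem_cons, List.not_mem_nil, or_false] at h
      rcases h with h | h | h | h | h | h | h <;>
        simp [h, pvBucketAppend, List.filter_append]

lemma B_closed (links : List String) :
    pick_pdf_like_links_alt links =
      ([6, 5, 4, 3, 2, 1] : List Int).flatMap
        (fun v => links.filter (fun l => pvScore l == v)) := by
  show (PySem.List.pyRange 6 0 (-1)).foldl
      (fun out s => out ++ pvBucketGet
        (links.foldl (fun bs link => pvBucketAppend bs (pvScore link).toNat link)
          [[], [], [], [], [], [], []]) s.toNat) [] = _
  rw [buckets_closed]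
  have hr : PySem.List.pyRange 6 0 (-1) = ([6, 5, 4, 3, 2, 1] : List Int) := by decide
  rw [hr, PySem.List.foldl_append_eq_flatMap]
  simp [List.flatMap_cons, pvBucketGet]

-- ===== VERDICT (by name: the statement is the Claim_ definition above) =====
theorem pick_pdf_like_links_spec : Claim_equal_pick_pdf_like_links := by
  intro links _
  unfold Spec_pick_pdf_like_links
  rw [A_closed, B_closed]
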